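-- pv_equiv track=rewrite | github.com/yy487/VS-tool | silky/Sweet～半熟な天使たち～/scb_inject.py | split_message_to_segments
-- ===== SOURCE A (Python) =====
-- def split_message_to_segments(message: str, n: int) -> tuple[list[str], list[str]]:
--     """Split editable message back to original body TEXT command count.
--
--     For multi-body messages the extracted scr_msg preserves internal #L, e.g.
--       quote#Lnote
--     which becomes [quote#L, note#W#P].
--     """
--     warnings: list[str] = []
--     if n <= 1:
--         return [message], warnings
--     parts: list[str] = []
--     rest = message
--     for _ in range(n - 1):
--         pos = rest.find('#L')
--         if pos < 0:
--             warnings.append('message has fewer #L separators than original body segments; kept text in first segment')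
--             parts.append(rest + '#L')
--             rest = ''
--         else:
--             parts.append(rest[:pos + 2])
--             rest = rest[pos + 2:]
--     parts.append(rest)
--     return parts, warnings
-- ===== SOURCE B (Python) =====
-- _WARN = 'message has fewer #L separators than original body segments; kept text in first segment'
--
-- def split_message_to_segments(message: str, n: int) -> tuple[list[str], list[str]]:
--     if n <= 1:
--         return [message], []
--     # pass 1: absolute end positions of the first up-to-(n-1) '#L' separators
--     cuts = []
--     i = 0
--     while len(cuts) < n - 1:
--         j = message.find('#L', i)
--         if j < 0:
--             break
--         i = j + 2
--         cuts.append(i)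
--     # pass 2: slice between consecutive boundaries, then pad in bulk
--     parts = [message[a:b] for a, b in zip([0] + cuts, cuts)]
--     missing = (n - 1) - len(cuts)
--     if missing == 0:
--         return parts + [message[i:]], []
--     return (parts + [message[i:] + '#L'] + ['#L'] * (missing - 1) + [''],
--             [_WARN] * missing)
-- ===== Notes on version B (the rewrite author's own statement) =====
-- stated objective: alternative
-- what changed: B replaces A's destructive loop on a shrinking rest string (find, slice off, repeat, appending per iteration) by two passes over the intact message: first collect the absolute end positions of the first up-to-(n-1) '#L' separators with find(start), then slice the message between consecutive boundaries and append the padding segments and warnings in bulk.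
import Mathlib
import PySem

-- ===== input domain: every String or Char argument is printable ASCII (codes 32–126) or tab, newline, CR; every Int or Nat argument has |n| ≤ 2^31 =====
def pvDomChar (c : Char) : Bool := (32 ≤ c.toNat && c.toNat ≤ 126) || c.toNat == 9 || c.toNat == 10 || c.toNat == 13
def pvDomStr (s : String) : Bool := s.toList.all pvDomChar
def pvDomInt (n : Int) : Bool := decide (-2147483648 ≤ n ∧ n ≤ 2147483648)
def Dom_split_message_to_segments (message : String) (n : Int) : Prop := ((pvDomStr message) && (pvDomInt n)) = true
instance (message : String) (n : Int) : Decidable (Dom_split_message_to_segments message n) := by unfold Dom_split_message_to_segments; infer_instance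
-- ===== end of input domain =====

-- B: two passes over the intact message (collect '#L' cut positions via find(start), then slice between
-- boundaries and pad in bulk) instead of A's per-iteration find-and-slice on a shrinking rest; objective: alternative.

def pvSep : List Char := ['#', 'L']
def pvWarn : String := "message has fewer #L separators than original body segments; kept text in first segment"

-- ===== PORT A =====
-- A's 'for _ in range(n - 1)' loop over the state (parts, rest, warnings), on the char list of the string
def aGo : Nat → List (List Char) → List Char → List String → (List (List Char) × List String)
  | 0, parts, rest, warns => (parts ++ [rest], warns)
  | k+1, parts, rest, warns =>
    let pos := PySem.Chars.find rest pvSep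
    if pos < 0 then
      aGo k (parts ++ [rest ++ pvSep]) [] (warns ++ [pvWarn])
    else
      aGo k (parts ++ [PySem.Chars.slice rest none (some (pos + 2))])
            (PySem.Chars.slice rest (some (pos + 2)) none) warns

def split_message_to_segments (message : String) (n : Int) : List String × List String :=
  if n ≤ 1 then ([message], [])
  else
    let res := aGo (n - 1).toNat [] message.toList []
    (res.1.map String.ofList, res.2)

-- ===== PORT B =====
-- B's pass 1: while len(cuts) < n - 1: j = message.find('#L', i); break if j < 0; i = j + 2; cuts.append(i)
def bCuts (msg : List Char) : Nat → Nat → (List Nat × Nat)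
  | 0, i => ([], i)
  | need+1, i =>
    let j := PySem.Chars.findFrom msg pvSep (i : Int) none
    if j < 0 then ([], i)
    else
      let res := bCuts msg need (j.toNat + 2)
      ((j.toNat + 2) :: res.1, res.2)

def split_message_to_segments_alt (message : String) (n : Int) : List String × List String :=
  if n ≤ 1 then ([message], [])
  else
    let msg := message.toList
    let ci := bCuts msg (n - 1).toNat 0
    let cuts := ci.1
    let parts := ((0 :: cuts).zip cuts).map
      (fun ab => PySem.Chars.slice msg (some (ab.1 : Int)) (some (ab.2 : Int)))
    let missing : Int := (n - 1) - cuts.length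
    if missing = 0 then
      ((parts ++ [PySem.Chars.slice msg (some (ci.2 : Int)) none]).map String.ofList, [])
    else
      ((parts ++ [PySem.Chars.slice msg (some (ci.2 : Int)) none ++ pvSep]
          ++ List.replicate (missing - 1).toNat pvSep ++ [[]]).map String.ofList,
       List.replicate missing.toNat pvWarn)

-- ===== PRECONDITION & SPEC =====
def Spec_split_message_to_segments (message : String) (n : Int) (out : List String × List String) : Prop := out = split_message_to_segments_alt message n
instance (message : String) (n : Int) (out : List String × List String) : Decidable (Spec_split_message_to_segments message n out) := by unfold Spec_split_message_to_segments; infer_instance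

-- ===== CLAIM (what is proved, stated in full; the proofs are below) =====
def Claim_equal_split_message_to_segments : Prop := ∀ (message : String) (n : Int), Dom_split_message_to_segments message n → Spec_split_message_to_segments message n (split_message_to_segments message n)

-- ===== LEMMAS AND PROOFS =====

lemma find_nil_sep : PySem.Chars.find [] pvSep = -1 := by decide

lemma aGo_nil (k : Nat) : ∀ (parts : List (List Char)) (warns : List String),
    aGo k parts [] warns
      = (parts ++ List.replicate k pvSep ++ [[]], warns ++ List.replicate k pvWarn) := by
  induction k with
  | zero => intro parts warns; simp [aGo]
  | succ k ih =>
    intro parts warns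
    simp only [aGo, find_nil_sep]
    norm_num
    rw [ih]
    simp [List.replicate_succ]

lemma bCuts_len_le (msg : List Char) (k : Nat) : ∀ i, ((bCuts msg k i).1).length ≤ k := by
  induction k with
  | zero => intro i; simp [bCuts]
  | succ k ih =>
    intro i
    simp only [bCuts]
    split
    · simp
    · simpa using Nat.succ_le_succ (ih _)

lemma aGo_eq_bCuts (msg : List Char) (k : Nat) :
    ∀ (i : Nat), i ≤ msg.length → ∀ (parts : List (List Char)) (warns : List String),
    aGo k parts (msg.drop i) warns =
      (parts
        ++ ((i :: (bCuts msg k i).1).zip (bCuts msg k i).1).map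
             (fun ab => (List.drop ab.1 msg).take (ab.2 - ab.1))
        ++ (if ((bCuts msg k i).1).length = k
            then [msg.drop (bCuts msg k i).2]
            else [msg.drop (bCuts msg k i).2 ++ pvSep]
                 ++ List.replicate (k - ((bCuts msg k i).1).length - 1) pvSep ++ [[]]),
       warns ++ List.replicate (k - ((bCuts msg k i).1).length) pvWarn) := by
  induction k with
  | zero =>
    intro i hi parts warns
    simp [aGo, bCuts]
  | succ k ih =>
    intro i hi parts warns
    have hfexp := PySem.Chars.findFrom_natCast msg pvSep i hi
    rcases lt_or_ge (PySem.Chars.find (msg.drop i) pvSep) 0 with hneg | hpos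
    · -- no further separator: A pads with the tail, then empty rounds
      have hm1 : PySem.Chars.find (msg.drop i) pvSep = -1 := by
        have := PySem.Chars.neg_one_le_find (msg.drop i) pvSep; omega
      have hb : bCuts msg (k+1) i = ([], i) := by
        simp [bCuts, hfexp, hm1]
      simp only [aGo, hm1, hb]
      rw [if_pos (by norm_num : (-1 : Int) < 0), aGo_nil]
      simp [List.replicate_succ]
    · -- separator found at i + p: one cut, recurse from i + p + 2
      obtain ⟨p, hp⟩ : ∃ p : Nat, PySem.Chars.find (msg.drop i) pvSep = (p : Int) :=
        ⟨_, (Int.toNat_of_nonneg hpos).symm⟩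
      have hpref : pvSep <+: List.drop p (msg.drop i) := by
        have := (PySem.Chars.find_spec (s := msg.drop i) (sub := pvSep) hpos).1
        rwa [hp, Int.toNat_natCast] at this
      have hlen : i + p + 2 ≤ msg.length := by
        have h2 : 2 ≤ (List.drop p (msg.drop i)).length := by
          have := hpref.length_le; simpa [pvSep] using this
        simp only [List.length_drop] at h2
        omega
      have hj : PySem.Chars.findFrom msg pvSep (i : Int) none = ((i + p : Nat) : Int) := by
        rw [hfexp, hp, if_neg (by omega : ¬ ((p : Nat) : Int) = -1)]
        push_cast
        ring
      have hb : bCuts msg (k+1) i =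
          ((i + p + 2) :: (bCuts msg k (i + p + 2)).1, (bCuts msg k (i + p + 2)).2) := by
        simp only [bCuts, hj]
        rw [if_neg (by omega : ¬ ((i + p : Nat) : Int) < 0)]
        have ht : ((i : Int) + (p : Int)).toNat = i + p := by omega
        simp [ht]
      have htn : ((p : Int) + 2).toNat = p + 2 := by omega
      have hsliceTo : PySem.List.slice (List.drop i msg) none (some ((p : Int) + 2))
          = List.take (p + 2) (List.drop i msg) := by
        rw [PySem.List.slice_to (List.drop i msg) (by omega), htn]
      have hsliceFrom : PySem.List.slice (List.drop i msg) (some ((p : Int) + 2)) none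
          = List.drop (i + (p + 2)) msg := by
        rw [PySem.List.slice_from (List.drop i msg) (by omega), List.drop_drop, htn]
      simp only [aGo, hp, hb, PySem.Chars.slice_eq_listSlice]
      rw [if_neg (by omega : ¬ ((p : Nat) : Int) < 0), hsliceTo, hsliceFrom]
      have hrec := ih (i + (p + 2)) (by omega)
        (parts ++ [(msg.drop i).take (p + 2)]) warns
      rw [hrec]
      have harith : i + (p + 2) = i + p + 2 := by omega
      rw [harith]
      simp only [List.zip_cons_cons, List.map_cons, List.length_cons, Prod.mk.injEq]
      have hhead : List.take (i + p + 2 - i) (List.drop i msg) = (msg.drop i).take (p + 2) := by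
        congr 1
        omega
      constructor
      · rw [hhead]
        by_cases hl : ((bCuts msg k (i + p + 2)).1).length = k
        · simp [hl]
        · have hne : ¬ ((bCuts msg k (i + p + 2)).1).length + 1 = k + 1 := by omega
          have h3 : k + 1 - (((bCuts msg k (i + p + 2)).1).length + 1) - 1
              = k - ((bCuts msg k (i + p + 2)).1).length - 1 := by omega
          simp [hl]
      · by_cases hl : ((bCuts msg k (i + p + 2)).1).length = k
        · simp [hl]
        · have hne : ¬ ((bCuts msg k (i + p + 2)).1).length + 1 = k + 1 := by omega
          have h4 : k + 1 - (((bCuts msg k (i + p + 2)).1).length + 1)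
              = k - ((bCuts msg k (i + p + 2)).1).length := by omega
          simp [h4]

-- ===== VERDICT (by name: the statement is the Claim_ definition above) =====
theorem split_message_to_segments_spec : Claim_equal_split_message_to_segments := by
  intro message n _hdom
  unfold Spec_split_message_to_segments
  unfold split_message_to_segments split_message_to_segments_alt
  by_cases hn : n ≤ 1
  · simp [hn]
  · simp only [hn, if_false]
    have hmain := aGo_eq_bCuts message.toList (n - 1).toNat 0 (by omega) [] []
    simp only [List.drop_zero] at hmain
    rw [hmain]
    have hle := bCuts_len_le message.toList (n - 1).toNat 0
    have hcast : ((n - 1).toNat : Int) = n - 1 := by omega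
    set ci := bCuts message.toList (n - 1).toNat 0 with hci
    by_cases hl : (ci.1).length = (n - 1).toNat
    · have hz : n - 1 - ((ci.1).length : Int) = 0 := by omega
      rw [if_pos hl, if_pos hz]
      simp [PySem.Chars.slice_eq_listSlice, PySem.List.slice_natCast, PySem.List.slice_from]
      omega
    · have hz : ¬ (n - 1 - ((ci.1).length : Int) = 0) := by omega
      rw [if_neg hl, if_neg hz]
      have h1 : (n - 1 - ((ci.1).length : Int) - 1).toNat = (n - 1).toNat - (ci.1).length - 1 := by omega
      have h2 : (n - 1 - ((ci.1).length : Int)).toNat = (n - 1).toNat - (ci.1).length := by omega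
      rw [h1, h2]
      simp [PySem.Chars.slice_eq_listSlice, PySem.List.slice_natCast, PySem.List.slice_from]
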